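-- pv_equiv track=rewrite | github.com/hernanc04/AED | Trabajos Prácticos/TP2/trabajos/test.py | doblemayus
-- ===== SOURCE A (Python) =====
-- def doblemayus(direccion):
--     anterior = ''
--     mayusdobles = False
--     for car in direccion:
--         if anterior.isupper() and car.isupper():
--             mayusdobles = True
--         anterior = car
--     return mayusdobles
-- ===== SOURCE B (Python) =====
-- def doblemayus(direccion):
--     mask = ''.join('U' if c.isupper() else '.' for c in direccion)
--     return 'UU' in mask
-- ===== Notes on version B (the rewrite author's own statement) =====
-- stated objective: alternative
-- what changed: Replaces the single stateful scan (remembered previous char + boolean flag) with two staged phases: first project the string to an uppercase mask ('U'/'.'), then decide by a substring containment test 'UU' in mask.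
import Mathlib
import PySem

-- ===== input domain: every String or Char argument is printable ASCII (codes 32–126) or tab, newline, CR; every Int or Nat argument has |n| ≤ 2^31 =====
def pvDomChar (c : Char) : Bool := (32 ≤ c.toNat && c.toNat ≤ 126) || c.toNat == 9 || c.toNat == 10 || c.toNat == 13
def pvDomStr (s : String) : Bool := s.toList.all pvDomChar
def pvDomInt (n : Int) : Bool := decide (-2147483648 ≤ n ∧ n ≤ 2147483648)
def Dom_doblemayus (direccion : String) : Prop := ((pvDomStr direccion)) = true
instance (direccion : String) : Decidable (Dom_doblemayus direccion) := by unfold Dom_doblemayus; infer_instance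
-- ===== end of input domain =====

-- ===== PORT A =====
-- B replaces the stateful previous-char scan with two staged phases: project the string to an
-- uppercase mask ('U'/'.') and decide by the substring test 'UU' in mask (alternative).
-- A's loop state = (anterior, mayusdobles); ''.isupper() is False, modelled as Option Char = none.
def doblemayus (direccion : String) : Bool :=
  (direccion.toList.foldl
    (fun (st : Option Char × Bool) car =>
      if (match st.1 with
          | some a => PySem.Chars.isupper a
          | none => false) && PySem.Chars.isupper car then
        (some car, true)
      else
        (some car, st.2))
    (none, false)).2

-- ===== PORT B =====
def doblemayus_alt (direccion : String) : Bool :=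
  let mask : String :=
    String.ofList (direccion.toList.map (fun c => if PySem.Chars.isupper c then 'U' else '.'))
  PySem.Str.isIn "UU" mask

-- ===== PRECONDITION & SPEC =====
def Spec_doblemayus (direccion : String) (out : Bool) : Prop := out = doblemayus_alt direccion
instance (direccion : String) (out : Bool) : Decidable (Spec_doblemayus direccion out) := by unfold Spec_doblemayus; infer_instance

-- ===== CLAIM (what is proved, stated in full; the proofs are below) =====
def Claim_equal_doblemayus : Prop := ∀ (direccion : String), Dom_doblemayus direccion → Spec_doblemayus direccion (doblemayus direccion)

-- ===== LEMMAS AND PROOFS =====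

-- 'UU' is an infix of x :: y :: r iff it is the length-2 prefix or an infix of the tail.
theorem pv_infix_cons_two (x y : Char) (r : List Char) :
    (['U','U'] <:+: x :: y :: r) ↔ (x = 'U' ∧ y = 'U') ∨ (['U','U'] <:+: y :: r) := by
  rw [List.infix_cons_iff]
  constructor
  · rintro (hp | hi)
    · rcases List.cons_prefix_cons.mp hp with ⟨hx, hp'⟩
      rcases List.cons_prefix_cons.mp hp' with ⟨hy, _⟩
      exact Or.inl ⟨hx.symm, hy.symm⟩
    · exact Or.inr hi
  · rintro (⟨hx, hy⟩ | hi)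
    · exact Or.inl (List.cons_prefix_cons.mpr ⟨hx.symm,
        List.cons_prefix_cons.mpr ⟨hy.symm, List.nil_prefix⟩⟩)
    · exact Or.inr hi

theorem pv_isIn_cons (x y : Char) (r : List Char) :
    PySem.Chars.isIn ['U','U'] (x :: y :: r)
      = ((x == 'U') && (y == 'U') || PySem.Chars.isIn ['U','U'] (y :: r)) := by
  rw [Bool.eq_iff_iff]
  simp [PySem.Chars.isIn_iff_infix, pv_infix_cons_two]

theorem pv_isIn_singleton (x : Char) : PySem.Chars.isIn ['U','U'] [x] = false := by
  rw [PySem.Chars.isIn_eq_false_iff]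
  intro h; have := h.length_le; simp at this

theorem pv_mask_eq (c : Char) :
    ((if PySem.Chars.isupper c then 'U' else '.') == 'U') = PySem.Chars.isupper c := by
  split_ifs with h <;> simp [h]

-- A's fold, once the first character is consumed, computes flag OR 'UU'-membership of the mask of a :: l.
theorem pv_step_some (l : List Char) : ∀ (a : Char) (b : Bool),
    (l.foldl
      (fun (st : Option Char × Bool) car =>
        if (match st.1 with
            | some x => PySem.Chars.isupper x
            | none => false) && PySem.Chars.isupper car then
          (some car, true)
        else
          (some car, st.2))
      (some a, b)).2
    = (b || PySem.Chars.isIn ['U','U']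
        ((a :: l).map (fun c => if PySem.Chars.isupper c then 'U' else '.'))) := by
  induction l with
  | nil =>
    intro a b
    simp [pv_isIn_singleton]
  | cons c t ih =>
    intro a b
    simp only [List.foldl_cons, List.map_cons]
    rw [pv_isIn_cons, pv_mask_eq, pv_mask_eq]
    by_cases h : (PySem.Chars.isupper a && PySem.Chars.isupper c) = true
    · rw [if_pos (by simpa using h), ih, h]
      simp
    · rw [if_neg (by simpa using h), ih,
        Bool.eq_false_iff.mpr h, Bool.false_or]
      simp only [List.map_cons]

-- ===== VERDICT (by name: the statement is the Claim_ definition above) =====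
theorem doblemayus_spec : Claim_equal_doblemayus := by
  intro s _
  unfold Spec_doblemayus doblemayus doblemayus_alt
  rw [show PySem.Str.isIn "UU"
      (String.ofList (s.toList.map (fun c => if PySem.Chars.isupper c then 'U' else '.')))
    = PySem.Chars.isIn ['U','U']
      (s.toList.map (fun c => if PySem.Chars.isupper c then 'U' else '.')) from by
    simp [PySem.Str.isIn_eq]]
  cases hl : s.toList with
  | nil =>
    simp
    decide
  | cons c t =>
    simp only [List.foldl_cons]
    rw [show (if (false && PySem.Chars.isupper c) = true then (some c, true)
        else (some c, (false : Bool))) = (some c, false) from by simp]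
    rw [pv_step_some]
    simp
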